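-- pv_equiv track=rewrite | github.com/k0walski8/packagetracker | custom_components/pl_package_tracker/api.py | _short_from_detail
-- ===== SOURCE A (Python) =====
-- def _short_from_detail(detail: str) -> str:
--     t = detail.lower()
--     # Delivered
--     if any(k in t for k in [
--         "delivered",
--         "doręczono",
--         "odebrano",
--         "dostarczono",
--         "przesyłka doręczona do odbiorcy",
--         "the shipment has been successfully delivered"
--     ]):
--         return "Delivered"
--
--     # Out for delivery (today)
--     if any(k in t for k in [
--         "out_for_delivery",
--         "w doręczeniu",
--         "kurier w drodze",
--         "dzisiaj doręczenie",
--         "przekazano do doręczenia",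
--         "in delivery",
--         "przesyłka przekazana kurierowi do doręczenia",
--         "the shipment has been loaded onto the delivery vehicle"
--     ]):
--         return "In delivery Today"
--
--     # Label created / registered
--     if any(k in t for k in [
--         "created",
--         "confirmed",
--         "utworzono",
--         "przygotowana przez nadawcę",
--         "zarejestrowano",
--         "nadanie zarejestrowane",
--         "przesyłka przyjęta w terminalu nadawczym dhl"
--     ]):
--         return "Label created"
--
--     # Transit / processing
--     if any(k in t for k in [
--         "przesyłka jest obsługiwana w centrum sortowania",
--         "the shipment has been processed in the parcel center"
--     ]):
--         return "In transit"
--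
--     # Default case for any other status
--     return "In transit"
-- ===== SOURCE B (Python) =====
-- # B: exhaustive min-priority scan over a flat keyword->priority map, then label lookup.
-- _KEYWORD_PRIO = {
--     "delivered": 0,
--     "dor\u0119czono": 0,
--     "odebrano": 0,
--     "dostarczono": 0,
--     "przesy\u0142ka dor\u0119czona do odbiorcy": 0,
--     "the shipment has been successfully delivered": 0,
--     "out_for_delivery": 1,
--     "w dor\u0119czeniu": 1,
--     "kurier w drodze": 1,
--     "dzisiaj dor\u0119czenie": 1,
--     "przekazano do dor\u0119czenia": 1,
--     "in delivery": 1,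
--     "przesy\u0142ka przekazana kurierowi do dor\u0119czenia": 1,
--     "the shipment has been loaded onto the delivery vehicle": 1,
--     "created": 2,
--     "confirmed": 2,
--     "utworzono": 2,
--     "przygotowana przez nadawc\u0119": 2,
--     "zarejestrowano": 2,
--     "nadanie zarejestrowane": 2,
--     "przesy\u0142ka przyj\u0119ta w terminalu nadawczym dhl": 2,
-- }
--
-- _LABELS = ["Delivered", "In delivery Today", "Label created", "In transit"]
--
--
-- def _short_from_detail(detail: str) -> str:
--     t = detail.lower()
--     best = 3
--     for k, p in _KEYWORD_PRIO.items():
--         if p < best and k in t: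
--             best = p
--     return _LABELS[best]
-- ===== Notes on version B (the rewrite author's own statement) =====
-- stated objective: alternative
-- what changed: Replaces the ordered early-return if/any chain by a single exhaustive fold over a flat keyword-to-priority map that keeps the minimum matching priority and finally indexes a label array (the redundant explicit 'In transit' group collapses into the default priority).
import Mathlib
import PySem

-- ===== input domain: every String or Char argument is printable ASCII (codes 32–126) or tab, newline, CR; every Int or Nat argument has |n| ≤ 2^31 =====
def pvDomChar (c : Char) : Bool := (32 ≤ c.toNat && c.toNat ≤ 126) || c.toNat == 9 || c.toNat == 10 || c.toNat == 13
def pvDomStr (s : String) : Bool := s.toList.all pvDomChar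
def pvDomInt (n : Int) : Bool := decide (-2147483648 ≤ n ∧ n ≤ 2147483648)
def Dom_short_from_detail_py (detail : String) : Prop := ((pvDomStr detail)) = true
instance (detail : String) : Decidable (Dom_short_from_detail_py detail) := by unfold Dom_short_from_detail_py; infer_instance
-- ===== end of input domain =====

-- B replaces A's ordered early-return if/any chain by one exhaustive min-priority fold over a
-- flat keyword→priority map followed by a label-array lookup (objective: alternative algorithm).

-- ===== PORT A =====
def short_from_detail_py (detail : String) : String :=
  let t := PySem.Str.lower detail
  if ["delivered", "doręczono", "odebrano", "dostarczono",
      "przesyłka doręczona do odbiorcy",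
      "the shipment has been successfully delivered"].any
      (fun k => PySem.Str.isIn k t) then "Delivered"
  else if ["out_for_delivery", "w doręczeniu", "kurier w drodze",
      "dzisiaj doręczenie", "przekazano do doręczenia", "in delivery",
      "przesyłka przekazana kurierowi do doręczenia",
      "the shipment has been loaded onto the delivery vehicle"].any
      (fun k => PySem.Str.isIn k t) then "In delivery Today"
  else if ["created", "confirmed", "utworzono", "przygotowana przez nadawcę",
      "zarejestrowano", "nadanie zarejestrowane",
      "przesyłka przyjęta w terminalu nadawczym dhl"].any
      (fun k => PySem.Str.isIn k t) then "Label created"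
  else if ["przesyłka jest obsługiwana w centrum sortowania",
      "the shipment has been processed in the parcel center"].any
      (fun k => PySem.Str.isIn k t) then "In transit"
  else "In transit"

-- ===== PORT B =====
-- Source B's _KEYWORD_PRIO dict, in insertion order (keys are distinct, so the assoc list is exact)
def pvKeywordPrio : List (String × Nat) :=
  [("delivered", 0), ("doręczono", 0), ("odebrano", 0), ("dostarczono", 0),
   ("przesyłka doręczona do odbiorcy", 0),
   ("the shipment has been successfully delivered", 0),
   ("out_for_delivery", 1), ("w doręczeniu", 1), ("kurier w drodze", 1),
   ("dzisiaj doręczenie", 1), ("przekazano do doręczenia", 1), ("in delivery", 1),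
   ("przesyłka przekazana kurierowi do doręczenia", 1),
   ("the shipment has been loaded onto the delivery vehicle", 1),
   ("created", 2), ("confirmed", 2), ("utworzono", 2),
   ("przygotowana przez nadawcę", 2), ("zarejestrowano", 2),
   ("nadanie zarejestrowane", 2),
   ("przesyłka przyjęta w terminalu nadawczym dhl", 2)]

def pvLabels : List String := ["Delivered", "In delivery Today", "Label created", "In transit"]

def short_from_detail_py_alt (detail : String) : String :=
  let t := PySem.Str.lower detail
  let best := pvKeywordPrio.foldl
    (fun best kp => if kp.2 < best ∧ PySem.Str.isIn kp.1 t = true then kp.2 else best) 3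
  pvLabels.getD best "In transit"

-- ===== PRECONDITION & SPEC =====
def Spec_short_from_detail_py (detail : String) (out : String) : Prop := out = short_from_detail_py_alt detail
instance (detail : String) (out : String) : Decidable (Spec_short_from_detail_py detail out) := by unfold Spec_short_from_detail_py; infer_instance

-- ===== CLAIM (what is proved, stated in full; the proofs are below) =====
def Claim_equal_short_from_detail_py : Prop := ∀ (detail : String), Dom_short_from_detail_py detail → Spec_short_from_detail_py detail (short_from_detail_py detail)

-- ===== LEMMAS AND PROOFS =====

-- folding one keyword group of constant priority p lowers the accumulator to p exactly
-- when p is below it and some keyword of the group occurs in t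
theorem pvFold_const_prio (t : String) (p b : Nat) (g : List String) :
    (g.map (fun k => (k, p))).foldl
      (fun best kp => if kp.2 < best ∧ PySem.Str.isIn kp.1 t = true then kp.2 else best) b
    = if p < b ∧ g.any (fun k => PySem.Str.isIn k t) = true then p else b := by
  induction g generalizing b with
  | nil => simp
  | cons k g ih =>
    simp only [List.map_cons, List.foldl_cons, List.any_cons]
    by_cases hk : PySem.Chars.isIn k.toList t.toList = true
    · by_cases hp : p < b
      · rw [if_pos ⟨hp, hk⟩, ih]
        simp [hp, hk]
      · rw [if_neg (fun h => hp h.1), ih]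
        simp [hp]
    · rw [if_neg (fun h => hk h.2), ih]
      simp [hk]

theorem pvKey (c0 c1 c2 c3 : Prop) [Decidable c0] [Decidable c1] [Decidable c2] [Decidable c3] :
    (if c0 then "Delivered" else if c1 then "In delivery Today" else if c2 then "Label created"
     else if c3 then "In transit" else "In transit")
    = pvLabels.getD
        (if 2 < (if 1 < (if 0 < 3 ∧ c0 then 0 else 3) ∧ c1 then 1
                 else (if 0 < 3 ∧ c0 then 0 else 3)) ∧ c2 then 2
         else (if 1 < (if 0 < 3 ∧ c0 then 0 else 3) ∧ c1 then 1
               else (if 0 < 3 ∧ c0 then 0 else 3)))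
        "In transit" := by
  by_cases h0 : c0 <;> by_cases h1 : c1 <;> by_cases h2 : c2 <;> by_cases h3 : c3 <;>
    simp [h0, h1, h2, h3, pvLabels]

theorem short_from_detail_py_eq_alt (detail : String) :
    short_from_detail_py detail = short_from_detail_py_alt detail := by
  unfold short_from_detail_py short_from_detail_py_alt
  have hsplit : pvKeywordPrio =
      (["delivered", "doręczono", "odebrano", "dostarczono",
        "przesyłka doręczona do odbiorcy",
        "the shipment has been successfully delivered"].map (fun k => (k, 0)))
      ++ (["out_for_delivery", "w doręczeniu", "kurier w drodze",
        "dzisiaj doręczenie", "przekazano do doręczenia", "in delivery",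
        "przesyłka przekazana kurierowi do doręczenia",
        "the shipment has been loaded onto the delivery vehicle"].map (fun k => (k, 1)))
      ++ (["created", "confirmed", "utworzono", "przygotowana przez nadawcę",
        "zarejestrowano", "nadanie zarejestrowane",
        "przesyłka przyjęta w terminalu nadawczym dhl"].map (fun k => (k, 2))) := rfl
  rw [hsplit]
  simp only [List.foldl_append, pvFold_const_prio]
  exact pvKey _ _ _ _

-- ===== VERDICT (by name: the statement is the Claim_ definition above) =====
theorem short_from_detail_py_spec : Claim_equal_short_from_detail_py := by
  intro detail _
  exact short_from_detail_py_eq_alt detail
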